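-- pv_equiv track=rewrite | github.com/pranav-pachn/Jobshield-AI | ai-service/services/scam_detection.py | _normalize_phrase_hits
-- ===== SOURCE A (Python) =====
-- from typing import Dict, List, Tuple, Optional
--
-- def _normalize_phrase_hits(raw_hits: List[Tuple[int, str]]) -> List[str]:
--     """Order hits by source position and remove generic duplicates."""
--     if not raw_hits:
--         return []
--
--     ordered = sorted(raw_hits, key=lambda item: item[0])
--     deduped: List[str] = []
--     seen = set()
--
--     for _, phrase in ordered:
--         if phrase in seen:
--             continue
--         seen.add(phrase)
--         deduped.append(phrase)
--
--     if "earn $" in deduped and any(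
--         phrase.startswith("earn $") and phrase != "earn $" for phrase in deduped
--     ):
--         deduped = [phrase for phrase in deduped if phrase != "earn $"]
--
--     if "high salary" in deduped and "high salary no experience" in deduped:
--         deduped = [phrase for phrase in deduped if phrase != "high salary"]
--
--     if "$3000 weekly" in deduped and "earn $3000 weekly" in deduped:
--         deduped = [phrase for phrase in deduped if phrase != "$3000 weekly"]
--
--     return deduped
-- ===== SOURCE B (Python) =====
-- def _normalize_phrase_hits(raw_hits):
--     """Order hits by source position and remove generic duplicates.
--
--     No sort of the hits and no seen-set: a single unsorted pass aggregates, per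
--     phrase, its earliest (position, index) occurrence into a dict; the distinct
--     phrases are then sorted once by that minimal key, and one filter applies the
--     specific removals."""
--     best = {}
--     for idx, (pos, phrase) in enumerate(raw_hits):
--         if phrase not in best or pos < best[phrase][0]:
--             best[phrase] = (pos, idx)
--
--     deduped = sorted(best, key=best.__getitem__)
--
--     drop = set()
--     if "earn $" in best and any(p != "earn $" and p.startswith("earn $") for p in best):
--         drop.add("earn $")
--     if "high salary" in best and "high salary no experience" in best:
--         drop.add("high salary")
--     if "$3000 weekly" in best and "earn $3000 weekly" in best:
--         drop.add("$3000 weekly")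
--
--     return [p for p in deduped if p not in drop]
-- ===== Notes on version B (the rewrite author's own statement) =====
-- stated objective: alternative
-- what changed: B never sorts the hit list and keeps no seen-set: one unsorted pass aggregates each phrase's minimal (position, index) occurrence into a dict, the distinct phrases are then sorted once by that key, and a single filter applies the specific removals (A stably sorts all hits, dedups with a seen-set, then rebuilds the list up to three times).
import Mathlib
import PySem

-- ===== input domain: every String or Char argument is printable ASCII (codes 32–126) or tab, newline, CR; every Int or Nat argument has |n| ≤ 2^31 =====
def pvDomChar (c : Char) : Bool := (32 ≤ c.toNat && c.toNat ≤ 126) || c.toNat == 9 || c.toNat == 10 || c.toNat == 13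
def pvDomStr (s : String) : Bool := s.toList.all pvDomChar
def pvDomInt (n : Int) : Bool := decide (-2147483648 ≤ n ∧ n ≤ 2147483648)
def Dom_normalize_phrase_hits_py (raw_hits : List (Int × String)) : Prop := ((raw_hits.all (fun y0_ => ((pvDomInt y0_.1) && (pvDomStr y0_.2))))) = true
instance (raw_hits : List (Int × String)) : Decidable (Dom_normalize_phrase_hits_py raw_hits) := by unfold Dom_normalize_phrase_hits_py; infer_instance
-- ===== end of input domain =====

-- B re-implements A without sorting the hits and without a seen-set: one unsorted pass aggregates each
-- phrase's minimal (position, index) occurrence into a dict, the distinct phrases are sorted once by that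
-- key, and a single filter applies the removals (alternative algorithm, similar cost).


-- ===== PORT A =====
def normalize_phrase_hits_py (raw_hits : List (Int × String)) : List String :=
  if raw_hits = [] then []
  else
    let ordered := PySem.List.sorted raw_hits (fun item => item.1)
    -- the for-loop over ordered with state (seen, deduped)
    let st := ordered.foldl (fun (st : PySem.Set String × List String) item =>
        if PySem.Set.contains st.1 item.2 then st
        else (PySem.Set.add st.1 item.2, st.2 ++ [item.2])) (PySem.Set.empty, [])
    let deduped := st.2
    let deduped :=
      if deduped.contains "earn $" &&
         deduped.any (fun phrase => PySem.Str.startswith phrase "earn $" && phrase != "earn $") then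
        deduped.filter (fun phrase => phrase != "earn $")
      else deduped
    let deduped :=
      if deduped.contains "high salary" && deduped.contains "high salary no experience" then
        deduped.filter (fun phrase => phrase != "high salary")
      else deduped
    let deduped :=
      if deduped.contains "$3000 weekly" && deduped.contains "earn $3000 weekly" then
        deduped.filter (fun phrase => phrase != "$3000 weekly")
      else deduped
    deduped

-- ===== PORT B =====
-- the body of B's aggregation loop: keep, per phrase, the occurrence with minimal (position, index)
def pvStep (d : PySem.Dict String (Int × Int)) (it : Int × (Int × String)) : PySem.Dict String (Int × Int) :=
  match PySem.Dict.get? d it.2.2 with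
  | none => PySem.Dict.insert d it.2.2 (it.2.1, it.1)
  | some c => if it.2.1 < c.1 then PySem.Dict.insert d it.2.2 (it.2.1, it.1) else d

def normalize_phrase_hits_py_alt (raw_hits : List (Int × String)) : List String :=
  let best := (PySem.List.enumerate raw_hits 0).foldl pvStep PySem.Dict.empty
  -- sorted(best, key=best.__getitem__): tuple key → sorted2; getD is exact here (every element is a key of best)
  let deduped := PySem.List.sorted2 (PySem.Dict.keys best)
      (fun p => (PySem.Dict.getD best p (0, 0)).1)
      (fun p => (PySem.Dict.getD best p (0, 0)).2)
  let drop : PySem.Set String := PySem.Set.empty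
  let drop := if PySem.Dict.contains best "earn $" &&
      (PySem.Dict.keys best).any (fun p => p != "earn $" && PySem.Str.startswith p "earn $")
    then PySem.Set.add drop "earn $" else drop
  let drop := if PySem.Dict.contains best "high salary" && PySem.Dict.contains best "high salary no experience"
    then PySem.Set.add drop "high salary" else drop
  let drop := if PySem.Dict.contains best "$3000 weekly" && PySem.Dict.contains best "earn $3000 weekly"
    then PySem.Set.add drop "$3000 weekly" else drop
  deduped.filter (fun p => !(PySem.Set.contains drop p))

-- ===== PRECONDITION & SPEC =====
def Spec_normalize_phrase_hits_py (raw_hits : List (Int × String)) (out : List String) : Prop := out = normalize_phrase_hits_py_alt raw_hits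
instance (raw_hits : List (Int × String)) (out : List String) : Decidable (Spec_normalize_phrase_hits_py raw_hits out) := by unfold Spec_normalize_phrase_hits_py; infer_instance

-- ===== CLAIM (what is proved, stated in full; the proofs are below) =====
def Claim_equal_normalize_phrase_hits_py : Prop := ∀ (raw_hits : List (Int × String)), Dom_normalize_phrase_hits_py raw_hits → Spec_normalize_phrase_hits_py raw_hits (normalize_phrase_hits_py raw_hits)

-- ===== LEMMAS AND PROOFS =====

-- abbreviations for the proofs
def pvE (raw : List (Int × String)) : List (Int × (Int × String)) := PySem.List.enumerate raw 0
def pvK (it : Int × (Int × String)) : Int ×ₗ Int := toLex (it.2.1, it.1)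
def pvT (raw : List (Int × String)) : List (Int × (Int × String)) := PySem.List.sorted (pvE raw) pvK
def pvM (raw : List (Int × String)) : List String := (pvT raw).map (fun it => it.2.2)
def pvB (raw : List (Int × String)) : PySem.Dict String (Int × Int) := (pvE raw).foldl pvStep PySem.Dict.empty
def pvD (raw : List (Int × String)) : List String :=
  PySem.Set.ofList ((PySem.List.sorted raw (fun item => item.1)).map (fun item => item.2))

-- A's dedup loop carries seen and deduped through the same add; they coincide, and equal Set.ofList.
lemma pv_fold_dedup (xs : List (Int × String)) (s : List String) :
    xs.foldl (fun (st : PySem.Set String × List String) item =>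
        if PySem.Set.contains st.1 item.2 then st
        else (PySem.Set.add st.1 item.2, st.2 ++ [item.2])) (s, s)
      = (let r := (xs.map (fun item => item.2)).foldl PySem.Set.add s; (r, r)) := by
  induction xs generalizing s with
  | nil => simp
  | cons x t ih =>
      simp only [List.foldl_cons, List.map_cons]
      cases hb : PySem.Set.contains s x.2 with
      | true =>
          have hm : x.2 ∈ s := by simpa using hb
          rw [if_pos rfl, show PySem.Set.add s x.2 = s from by simp [PySem.Set.add, hm]]
          exact ih s
      | false =>
          have hm : ¬ x.2 ∈ s := by simpa using hb
          rw [if_neg (by simp),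
              show (PySem.Set.add s x.2, s ++ [x.2]) = ((PySem.Set.add s x.2 : PySem.Set String), PySem.Set.add s x.2) from by
                simp [PySem.Set.add, hm]]
          exact ih _

-- filtering out one string does not change membership of a different string
lemma pv_contains_filter_ne (d : List String) (a b : String) (h : b ≠ a) :
    (d.filter (fun p => p != a)).contains b = d.contains b := by
  cases hc : d.contains b <;> simp_all [List.mem_filter]

-- String == is decidable equality
lemma pv_beq_decide (x a : String) : (x == a) = decide (x = a) := by
  cases h : decide (x = a) <;> simp_all

lemma pv_bool_eq {a b : Bool} (h : a = true ↔ b = true) : a = b := by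
  cases a <;> cases b <;> simp_all

lemma pv_enumerate_append (xs : List (Int × String)) (x : Int × String) (s : Int) :
    PySem.List.enumerate (xs ++ [x]) s
      = PySem.List.enumerate xs s ++ [(s + xs.length, x)] := by
  induction xs generalizing s with
  | nil => simp [PySem.List.enumerate_cons]
  | cons y ys ih =>
      simp only [List.cons_append, PySem.List.enumerate_cons, ih (s + 1), List.length_cons,
        Nat.cast_add, Nat.cast_one]
      have harith : s + 1 + (ys.length : Int) = s + ((ys.length : Int) + 1) := by omega
      rw [harith]

lemma pv_fst_bounds (raw : List (Int × String)) :
    ∀ it ∈ pvE raw, 0 ≤ it.1 ∧ it.1 < (raw.length : Int) := by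
  intro it hit
  have h1 : it.1 ∈ (pvE raw).map (fun it => it.1) := List.mem_map_of_mem hit
  rw [show (pvE raw).map (fun it => it.1) = PySem.List.pyRange 0 (0 + raw.length) 1 from
        PySem.List.map_fst_enumerate raw 0] at h1
  have := (PySem.List.mem_pyRange_one).mp h1
  omega

-- sorted over an appended element is an insertBy into the sorted prefix
lemma pv_sorted_append {α κ : Type} [LinearOrder κ] (xs : List α) (x : α) (key : α → κ) :
    PySem.List.sorted (xs ++ [x]) key
      = PySem.List.insertBy (fun a b => decide (key a < key b)) x (PySem.List.sorted xs key) := by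
  rw [PySem.List.sorted_eq_foldl_insertBy, PySem.List.sorted_eq_foldl_insertBy, List.foldl_append]
  rfl

lemma pv_insertBy_map {α β : Type} (b' : α → α → Bool) (b : β → β → Bool) (g : α → β)
    (z : α) (l : List α) (h : ∀ y ∈ l, b' z y = b (g z) (g y)) :
    (PySem.List.insertBy b' z l).map g = PySem.List.insertBy b (g z) (l.map g) := by
  induction l with
  | nil => simp [PySem.List.insertBy]
  | cons y ys ih =>
      have hy := h y (by simp)
      cases hb : b' z y with
      | true =>
          simp only [List.map_cons]
          rw [show PySem.List.insertBy b' z (y :: ys) = z :: y :: ys from by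
                simp [PySem.List.insertBy, hb],
              show PySem.List.insertBy b (g z) (g y :: ys.map g) = g z :: g y :: ys.map g from by
                simp [PySem.List.insertBy, ← hy, hb]]
          simp
      | false =>
          simp only [List.map_cons]
          rw [show PySem.List.insertBy b' z (y :: ys) = y :: PySem.List.insertBy b' z ys from by
                simp [PySem.List.insertBy, hb],
              show PySem.List.insertBy b (g z) (g y :: ys.map g)
                  = g y :: PySem.List.insertBy b (g z) (ys.map g) from by
                simp [PySem.List.insertBy, ← hy, hb]]
          simp only [List.map_cons]
          rw [ih (fun w hw => h w (by simp [hw]))]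

-- sorted2 with two scalar keys is sorted by the lexicographic key
lemma pv_sorted2_lex (xs : List String) (k1 k2 : String → Int) :
    PySem.List.sorted2 xs k1 k2
      = PySem.List.sorted xs (fun a => (toLex (k1 a, k2 a) : Int ×ₗ Int)) := by
  have hb : (fun a b => decide (k1 a < k1 b) || (!decide (k1 b < k1 a) && decide (k2 a < k2 b)))
      = (fun a b => decide ((toLex (k1 a, k2 a) : Int ×ₗ Int) < toLex (k1 b, k2 b))) := by
    funext a b
    rcases lt_trichotomy (k1 a) (k1 b) with h | h | h
    · simp [Prod.Lex.toLex_lt_toLex, h]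
    · simp [Prod.Lex.toLex_lt_toLex, h]
    · simp [Prod.Lex.toLex_lt_toLex, h, not_lt_of_gt h, h.ne']
  show List.foldl _ [] xs = List.foldl _ [] xs
  simp only [Bool.false_eq_true, if_false]
  rw [hb]

-- decoration: dropping the indices from the lex-sorted enumerated list gives A's stable sort
lemma pv_dec (raw : List (Int × String)) :
    (pvT raw).map (fun it => it.2) = PySem.List.sorted raw (fun item => item.1) := by
  induction raw using List.reverseRecOn with
  | nil => simp [pvT, pvE, PySem.List.enumerate, PySem.List.sorted]
  | append_singleton ys x ih =>
      have he : pvE (ys ++ [x]) = pvE ys ++ [((ys.length : Int), x)] := by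
        simpa using pv_enumerate_append ys x 0
      have hcmp : ∀ y ∈ PySem.List.sorted (pvE ys) pvK,
          (fun a b => decide (pvK a < pvK b)) (((ys.length : Int), x)) y
            = (fun (a b : Int × String) => decide (a.1 < b.1)) (((ys.length : Int), x)).2 y.2 := by
        intro y hy
        have hmem : y ∈ pvE ys := (PySem.List.sorted_perm (pvE ys) pvK false).mem_iff.mp hy
        have hbd := (pv_fst_bounds ys y hmem).2
        simp only [pvK, Prod.Lex.toLex_lt_toLex, decide_eq_decide]
        constructor
        · rintro (h | ⟨h1, h2⟩)
          · exact h
          · omega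
        · intro h
          exact Or.inl h
      rw [pvT, he, pv_sorted_append, pv_sorted_append,
        pv_insertBy_map (fun a b => decide (pvK a < pvK b))
          (fun (a b : Int × String) => decide (a.1 < b.1)) (fun it => it.2)
          (((ys.length : Int), x)) (PySem.List.sorted (pvE ys) pvK) hcmp,
        show PySem.List.sorted (pvE ys) pvK = pvT ys from rfl, ih]

lemma pv_m_eq (raw : List (Int × String)) :
    (PySem.List.sorted raw (fun item => item.1)).map (fun item => item.2) = pvM raw := by
  rw [← pv_dec, List.map_map]
  rfl

lemma pv_nodup_keys_aux (l : List (Int × (Int × String))) (d : PySem.Dict String (Int × Int))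
    (h : d.keys.Nodup) : (l.foldl pvStep d).keys.Nodup := by
  induction l generalizing d with
  | nil => simpa using h
  | cons it l ih =>
      simp only [List.foldl_cons]
      apply ih
      unfold pvStep
      cases hg : PySem.Dict.get? d it.2.2 with
      | none => exact PySem.Dict.nodup_keys_insert _ _ _ h
      | some c =>
          by_cases hlt : it.2.1 < c.1
          · simp only [hlt, if_pos]
            exact PySem.Dict.nodup_keys_insert _ _ _ h
          · simp only [hlt, if_false]
            exact h

lemma pv_nodup_keys (raw : List (Int × String)) : (pvB raw).keys.Nodup :=
  pv_nodup_keys_aux _ _ (by simp [PySem.Dict.keys, PySem.Dict.empty])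

-- the dict stores, per phrase, an actual occurrence, minimal by (position, index)
lemma pv_best_spec (raw : List (Int × String)) :
    (∀ ph v, (pvB raw).get? ph = some v → (v.2, (v.1, ph)) ∈ pvE raw)
    ∧ (∀ it ∈ pvE raw, ∃ v, (pvB raw).get? it.2.2 = some v ∧
        (v.1 < it.2.1 ∨ (v.1 = it.2.1 ∧ v.2 ≤ it.1))) := by
  induction raw using List.reverseRecOn with
  | nil =>
      constructor
      · intro ph v hv; simp [pvB, pvE, PySem.List.enumerate, PySem.Dict.get?_empty] at hv
      · intro it hit; simp [pvE, PySem.List.enumerate] at hit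
  | append_singleton ys x ih =>
      obtain ⟨M1, M2⟩ := ih
      have he : pvE (ys ++ [x]) = pvE ys ++ [((ys.length : Int), x)] := by
        simpa using pv_enumerate_append ys x 0
      have hB : pvB (ys ++ [x]) = pvStep (pvB ys) ((ys.length : Int), x) := by
        rw [pvB, he, List.foldl_append]
        rfl
      have hbnd : ∀ ph v, (pvB ys).get? ph = some v → v.2 < (ys.length : Int) := by
        intro ph v hv
        exact (pv_fst_bounds ys _ (M1 ph v hv)).2
      rw [hB, he]
      unfold pvStep
      cases hg : PySem.Dict.get? (pvB ys) x.2 with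
      | none =>
          simp only
          constructor
          · intro ph v hv
            rw [PySem.Dict.get?_insert] at hv
            split_ifs at hv with hph
            · subst hph
              cases hv
              simp
            · exact List.mem_append_left _ (M1 ph v hv)
          · intro it hit
            rcases List.mem_append.mp hit with hl | hr
            · by_cases hph : it.2.2 = x.2
              · exfalso
                obtain ⟨v, hv, _⟩ := M2 it hl
                rw [hph, hg] at hv
                cases hv
              · obtain ⟨v, hv, hle⟩ := M2 it hl
                exact ⟨v, by rw [PySem.Dict.get?_insert, if_neg hph]; exact hv, hle⟩
            · have : it = ((ys.length : Int), x) := by simpa using hr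
              subst this
              refine ⟨(x.1, (ys.length : Int)), ?_, Or.inr ⟨rfl, le_refl _⟩⟩
              rw [PySem.Dict.get?_insert, if_pos rfl]
      | some c =>
          by_cases hlt : x.1 < c.1
          · simp only [hlt, if_pos]
            constructor
            · intro ph v hv
              rw [PySem.Dict.get?_insert] at hv
              split_ifs at hv with hph
              · subst hph
                cases hv
                simp
              · exact List.mem_append_left _ (M1 ph v hv)
            · intro it hit
              rcases List.mem_append.mp hit with hl | hr
              · by_cases hph : it.2.2 = x.2
                · obtain ⟨v, hv, hle⟩ := M2 it hl
                  rw [hph, hg] at hv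
                  cases hv
                  refine ⟨(x.1, (ys.length : Int)), ?_, Or.inl ?_⟩
                  · rw [PySem.Dict.get?_insert, if_pos hph]
                  · rcases hle with h | ⟨h, _⟩ <;> omega
                · obtain ⟨v, hv, hle⟩ := M2 it hl
                  exact ⟨v, by rw [PySem.Dict.get?_insert, if_neg hph]; exact hv, hle⟩
              · have : it = ((ys.length : Int), x) := by simpa using hr
                subst this
                refine ⟨(x.1, (ys.length : Int)), ?_, Or.inr ⟨rfl, le_refl _⟩⟩
                rw [PySem.Dict.get?_insert, if_pos rfl]
          · simp only [hlt, if_false]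
            constructor
            · intro ph v hv
              exact List.mem_append_left _ (M1 ph v hv)
            · intro it hit
              rcases List.mem_append.mp hit with hl | hr
              · exact M2 it hl
              · have : it = ((ys.length : Int), x) := by simpa using hr
                subst this
                have hc2 : c.2 < (ys.length : Int) := hbnd x.2 c hg
                refine ⟨c, hg, ?_⟩
                simp only
                by_cases hceq : c.1 = x.1
                · exact Or.inr ⟨hceq, le_of_lt hc2⟩
                · exact Or.inl (by omega)

-- the lex-sorted enumerated list has strictly increasing keys
lemma pv_t_pairwise (raw : List (Int × String)) :
    (pvT raw).Pairwise (fun a b => pvK a < pvK b) := by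
  have h1 : (pvT raw).Pairwise (fun a b => pvK a ≤ pvK b) :=
    PySem.List.sorted_pairwise (pvE raw) pvK
  have hfst : ((pvE raw).map (fun it => it.1)).Nodup := by
    rw [show (pvE raw).map (fun it => it.1) = PySem.List.pyRange 0 (0 + raw.length) 1 from
          PySem.List.map_fst_enumerate raw 0]
    exact PySem.List.nodup_pyRange_one _ _
  have hcomp : ((pvE raw).map pvK).map (fun l => (ofLex l).2) = (pvE raw).map (fun it => it.1) := by
    rw [List.map_map]
    rfl
  have hnE : ((pvE raw).map pvK).Nodup := List.Nodup.of_map _ (hcomp ▸ hfst)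
  have hnT : ((pvT raw).map pvK).Nodup :=
    (((PySem.List.sorted_perm (pvE raw) pvK false).map pvK).nodup_iff).mpr hnE
  have hne : (pvT raw).Pairwise (fun a b => pvK a ≠ pvK b) := by
    rw [List.Nodup, List.pairwise_map] at hnT
    exact hnT
  exact (h1.and hne).imp (fun h => lt_of_le_of_ne h.1 h.2)

lemma pv_ne_of_lt_idxOf (l : List String) (x : String) :
    ∀ i (hi : i < l.length), i < l.idxOf x → l[i] ≠ x := by
  induction l with
  | nil => intro i hi; simp at hi
  | cons b l ih =>
      intro i hi h
      by_cases hbx : b = x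
      · rw [List.idxOf_cons_eq _ hbx] at h
        omega
      · rw [List.idxOf_cons_ne _ hbx] at h
        cases i with
        | zero => simpa using hbx
        | succ i => simpa using ih i (by simpa using hi) (by omega)

-- what B stores for a phrase is the key of its first occurrence in the lex-sorted list
lemma pv_key_at (raw : List (Int × String)) (a : String) (h : a ∈ pvM raw)
    (hj : (pvM raw).idxOf a < (pvT raw).length) :
    (pvB raw).get? a = some ((pvT raw)[(pvM raw).idxOf a].2.1, (pvT raw)[(pvM raw).idxOf a].1) := by
  obtain ⟨M1, M2⟩ := pv_best_spec raw
  have hjm : (pvM raw).idxOf a < (pvM raw).length := List.idxOf_lt_length_iff.mpr h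
  have htj2 : (pvT raw)[(pvM raw).idxOf a].2.2 = a := by
    have h2 : (pvM raw)[(pvM raw).idxOf a]'hjm = (pvT raw)[(pvM raw).idxOf a].2.2 :=
      List.getElem_map _
    rw [← h2]
    exact List.getElem_idxOf hjm
  have htjE : (pvT raw)[(pvM raw).idxOf a] ∈ pvE raw :=
    (PySem.List.sorted_perm (pvE raw) pvK false).mem_iff.mp (List.getElem_mem hj)
  obtain ⟨v, hv, hle⟩ := M2 _ htjE
  rw [htj2] at hv
  have hocc : (v.2, (v.1, a)) ∈ pvT raw :=
    (PySem.List.sorted_perm (pvE raw) pvK false).symm.mem_iff.mp (M1 a v hv)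
  obtain ⟨i, hi, hti⟩ := List.getElem_of_mem hocc
  rcases lt_trichotomy i ((pvM raw).idxOf a) with hij | hij | hij
  · exfalso
    have hmi : (pvM raw)[i]'(by simpa [pvM] using hi) = a := by
      simp [pvM, hti]
    exact pv_ne_of_lt_idxOf (pvM raw) a i (by simpa [pvM] using hi) hij hmi
  · subst hij
    rw [hv]
    simp [hti]
  · exfalso
    have hp := List.pairwise_iff_getElem.mp (pv_t_pairwise raw) _ _ hj hi hij
    have hki : pvK ((pvT raw)[i]) = toLex (v.1, v.2) := by rw [hti]; rfl
    have hkle : (toLex (v.1, v.2) : Int ×ₗ Int) ≤ pvK ((pvT raw)[(pvM raw).idxOf a]) := by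
      show (toLex (v.1, v.2) : Int ×ₗ Int) ≤ toLex ((pvT raw)[(pvM raw).idxOf a].2.1, (pvT raw)[(pvM raw).idxOf a].1)
      exact Prod.Lex.toLex_le_toLex.mpr hle
    rw [hki] at hp
    exact absurd (lt_of_le_of_lt hkle hp) (lt_irrefl _)

-- order-preserving dedup lists distinct elements by their first index
lemma pv_ofList_append (ys : List String) (x : String) :
    PySem.Set.ofList (ys ++ [x])
      = if x ∈ ys then PySem.Set.ofList ys else PySem.Set.ofList ys ++ [x] := by
  rw [PySem.Set.ofList_eq_foldl, List.foldl_append, List.foldl_cons, List.foldl_nil,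
    ← PySem.Set.ofList_eq_foldl]
  by_cases hx : x ∈ ys <;> simp [PySem.Set.add, PySem.Set.mem_ofList, hx]

lemma pv_ofList_pairwise_idxOf (m : List String) :
    (PySem.Set.ofList m).Pairwise (fun a b => m.idxOf a < m.idxOf b) := by
  induction m using List.reverseRecOn with
  | nil => simp [PySem.Set.ofList]
  | append_singleton ys x ih =>
      rw [pv_ofList_append]
      by_cases hx : x ∈ ys
      · rw [if_pos hx]
        refine ih.imp_of_mem ?_
        intro a b ha hb hab
        have ha' : a ∈ ys := (PySem.Set.mem_ofList _ _).mp ha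
        have hb' : b ∈ ys := (PySem.Set.mem_ofList _ _).mp hb
        rw [List.idxOf_append_of_mem ha', List.idxOf_append_of_mem hb']
        exact hab
      · rw [if_neg hx]
        rw [List.pairwise_append]
        refine ⟨ih.imp_of_mem ?_, by simp, ?_⟩
        · intro a b ha hb hab
          have ha' : a ∈ ys := (PySem.Set.mem_ofList _ _).mp ha
          have hb' : b ∈ ys := (PySem.Set.mem_ofList _ _).mp hb
          rw [List.idxOf_append_of_mem ha', List.idxOf_append_of_mem hb']
          exact hab
        · intro a ha b hb
          have hb' : b = x := by simpa using hb
          subst hb'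
          have ha' : a ∈ ys := (PySem.Set.mem_ofList _ _).mp ha
          rw [List.idxOf_append_of_mem ha', List.idxOf_append_of_notMem hx]
          have h1 : ys.idxOf a < ys.length := List.idxOf_lt_length_iff.mpr ha'
          have h2 : List.idxOf b ([b] : List String) = 0 := List.idxOf_cons_eq _ rfl
          omega

lemma pv_mem_m_iff (raw : List (Int × String)) (a : String) :
    a ∈ pvM raw ↔ ∃ it ∈ pvE raw, it.2.2 = a := by
  rw [pvM]
  constructor
  · intro h
    obtain ⟨it, hit, he⟩ := List.mem_map.mp h
    exact ⟨it, (PySem.List.sorted_perm (pvE raw) pvK false).mem_iff.mp hit, he⟩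
  · rintro ⟨it, hit, he⟩
    exact List.mem_map.mpr ⟨it, (PySem.List.sorted_perm (pvE raw) pvK false).symm.mem_iff.mp hit, he⟩

lemma pv_mem_keys_iff (raw : List (Int × String)) (a : String) :
    a ∈ (pvB raw).keys ↔ a ∈ pvM raw := by
  obtain ⟨M1, M2⟩ := pv_best_spec raw
  constructor
  · intro h
    rcases hg : (pvB raw).get? a with _ | v
    · exact absurd ((PySem.Dict.get?_eq_none_iff_not_mem_keys _ _).mp hg) (by simpa using h)
    · exact (pv_mem_m_iff raw a).mpr ⟨(v.2, (v.1, a)), M1 a v hg, rfl⟩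
  · intro h
    obtain ⟨it, hit, he⟩ := (pv_mem_m_iff raw a).mp h
    obtain ⟨v, hv, _⟩ := M2 it hit
    rw [he] at hv
    by_contra hk
    rw [(PySem.Dict.get?_eq_none_iff_not_mem_keys _ _).mpr hk] at hv
    cases hv

lemma pv_D_eq (raw : List (Int × String)) : pvD raw = PySem.Set.ofList (pvM raw) := by
  rw [pvD, pv_m_eq]

lemma pv_keys_perm (raw : List (Int × String)) : ((pvB raw).keys).Perm (pvD raw) := by
  rw [pv_D_eq]
  rw [List.perm_ext_iff_of_nodup (pv_nodup_keys raw) (PySem.Set.nodup_ofList _)]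
  intro a
  rw [pv_mem_keys_iff, PySem.Set.mem_ofList]

lemma pv_contains_eq (raw : List (Int × String)) (s : String) :
    PySem.Dict.contains (pvB raw) s = List.contains (pvD raw) s := by
  apply pv_bool_eq
  rw [PySem.Dict.contains_iff_mem_keys]
  rw [(pv_keys_perm raw).mem_iff]
  simp

-- MAIN: B's sort of the distinct phrases by minimal key equals A's sorted-then-deduped list
lemma pv_main (raw : List (Int × String)) :
    PySem.List.sorted2 ((pvB raw).keys)
      (fun p => (PySem.Dict.getD (pvB raw) p (0, 0)).1)
      (fun p => (PySem.Dict.getD (pvB raw) p (0, 0)).2)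
    = pvD raw := by
  rw [pv_sorted2_lex]
  have hk : (fun p => (toLex ((PySem.Dict.getD (pvB raw) p (0, 0)).1, (PySem.Dict.getD (pvB raw) p (0, 0)).2) : Int ×ₗ Int))
      = fun p => (toLex (PySem.Dict.getD (pvB raw) p (0, 0)) : Int ×ₗ Int) := by
    funext p
    rw [Prod.mk.eta]
  rw [hk]
  apply PySem.List.sorted_eq_of_perm_of_pairwise_lt
  · exact (pv_keys_perm raw).symm
  · rw [pv_D_eq]
    refine (pv_ofList_pairwise_idxOf (pvM raw)).imp_of_mem ?_
    intro a b ha hb hab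
    have ha' : a ∈ pvM raw := (PySem.Set.mem_ofList _ _).mp ha
    have hb' : b ∈ pvM raw := (PySem.Set.mem_ofList _ _).mp hb
    have hja : (pvM raw).idxOf a < (pvT raw).length := by
      have := List.idxOf_lt_length_iff.mpr ha'
      rw [pvM, List.length_map] at this
      exact this
    have hjb : (pvM raw).idxOf b < (pvT raw).length := by
      have := List.idxOf_lt_length_iff.mpr hb'
      rw [pvM, List.length_map] at this
      exact this
    have hka := pv_key_at raw a ha' hja
    have hkb := pv_key_at raw b hb' hjb
    rw [PySem.Dict.getD_eq_get?_getD, hka, PySem.Dict.getD_eq_get?_getD, hkb]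
    simp only [Option.getD_some]
    exact List.pairwise_iff_getElem.mp (pv_t_pairwise raw) _ _ hja hjb hab

-- ===== VERDICT (by name: the statement is the Claim_ definition above) =====
theorem normalize_phrase_hits_py_spec : Claim_equal_normalize_phrase_hits_py := by
  intro raw _
  unfold Spec_normalize_phrase_hits_py
  by_cases hnil : raw = []
  · subst hnil
    decide
  · rw [normalize_phrase_hits_py, normalize_phrase_hits_py_alt, if_neg hnil]
    simp only [PySem.Set.empty, pv_fold_dedup, ← PySem.Set.ofList_eq_foldl]
    have hmain := pv_main raw
    have hcont := pv_contains_eq raw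
    have hany : ((pvB raw).keys).any (fun p => p != "earn $" && PySem.Str.startswith p "earn $")
        = (pvD raw).any (fun phrase => PySem.Str.startswith phrase "earn $" && phrase != "earn $") := by
      rw [(pv_keys_perm raw).any_eq]
      congr 1
      funext p
      rw [Bool.and_comm]
    simp only [pvB, pvE] at hmain hcont hany
    rw [show PySem.Set.ofList (List.map (fun item => item.2) (PySem.List.sorted raw fun item => item.1)) = pvD raw from rfl]
    rw [hmain]
    simp only [hcont]
    rw [hany]
    generalize pvD raw = d
    cases h1 : (List.contains d "earn $" && List.any d fun phrase => PySem.Str.startswith phrase "earn $" && phrase != "earn $") with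
    | false =>
      simp only [Bool.false_eq_true, if_false]
      cases h2 : (List.contains d "high salary" && List.contains d "high salary no experience") with
      | false =>
        simp only [Bool.false_eq_true, if_false]
        cases h3 : (List.contains d "$3000 weekly" && List.contains d "earn $3000 weekly") with
        | false => simp
        | true =>
          simp only [reduceIte]
          refine List.filter_congr fun x hx => ?_
          simp only [PySem.Set.contains_eq_listContains, PySem.Set.add, bne, List.contains_cons,
            List.contains_nil, Bool.or_false, pv_beq_decide, Bool.false_eq_true,
            if_false, List.nil_append]
      | true =>
        simp only [reduceIte]
        rw [pv_contains_filter_ne d "high salary" "$3000 weekly" (by decide),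
            pv_contains_filter_ne d "high salary" "earn $3000 weekly" (by decide)]
        cases h3 : (List.contains d "$3000 weekly" && List.contains d "earn $3000 weekly") with
        | false =>
          simp only [Bool.false_eq_true, if_false]
          refine List.filter_congr fun x hx => ?_
          simp only [PySem.Set.contains_eq_listContains, PySem.Set.add, bne, List.contains_cons,
            List.contains_nil, Bool.or_false, pv_beq_decide, Bool.false_eq_true,
            if_false, List.nil_append]
        | true =>
          simp only [reduceIte]
          rw [show ((PySem.Set.add [] "high salary").add "$3000 weekly" : PySem.Set String)
                = ["high salary", "$3000 weekly"] from by decide,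
              List.filter_filter]
          refine List.filter_congr fun x hx => ?_
          simp only [PySem.Set.contains_eq_listContains, bne, List.contains_cons, List.contains_nil,
            Bool.or_false, Bool.not_or]
          ac_rfl
    | true =>
      simp only [reduceIte]
      rw [pv_contains_filter_ne d "earn $" "high salary" (by decide),
          pv_contains_filter_ne d "earn $" "high salary no experience" (by decide)]
      cases h2 : (List.contains d "high salary" && List.contains d "high salary no experience") with
      | false =>
        simp only [Bool.false_eq_true, if_false]
        rw [pv_contains_filter_ne d "earn $" "$3000 weekly" (by decide),
            pv_contains_filter_ne d "earn $" "earn $3000 weekly" (by decide)]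
        cases h3 : (List.contains d "$3000 weekly" && List.contains d "earn $3000 weekly") with
        | false =>
          simp only [Bool.false_eq_true, if_false]
          refine List.filter_congr fun x hx => ?_
          simp only [PySem.Set.contains_eq_listContains, PySem.Set.add, bne, List.contains_cons,
            List.contains_nil, Bool.or_false, pv_beq_decide, Bool.false_eq_true,
            if_false, List.nil_append]
        | true =>
          simp only [reduceIte]
          rw [show ((PySem.Set.add [] "earn $").add "$3000 weekly" : PySem.Set String)
                = ["earn $", "$3000 weekly"] from by decide,
              List.filter_filter]
          refine List.filter_congr fun x hx => ?_
          simp only [PySem.Set.contains_eq_listContains, bne, List.contains_cons, List.contains_nil,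
            Bool.or_false, Bool.not_or]
          ac_rfl
      | true =>
        simp only [reduceIte]
        rw [pv_contains_filter_ne (d.filter (fun phrase => phrase != "earn $")) "high salary" "$3000 weekly" (by decide),
            pv_contains_filter_ne d "earn $" "$3000 weekly" (by decide),
            pv_contains_filter_ne (d.filter (fun phrase => phrase != "earn $")) "high salary" "earn $3000 weekly" (by decide),
            pv_contains_filter_ne d "earn $" "earn $3000 weekly" (by decide)]
        cases h3 : (List.contains d "$3000 weekly" && List.contains d "earn $3000 weekly") with
        | false =>
          simp only [Bool.false_eq_true, if_false]
          rw [show ((PySem.Set.add [] "earn $").add "high salary" : PySem.Set String)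
                = ["earn $", "high salary"] from by decide,
              List.filter_filter]
          refine List.filter_congr fun x hx => ?_
          simp only [PySem.Set.contains_eq_listContains, bne, List.contains_cons, List.contains_nil,
            Bool.or_false, Bool.not_or]
          ac_rfl
        | true =>
          simp only [reduceIte]
          rw [show (((PySem.Set.add [] "earn $").add "high salary").add "$3000 weekly" : PySem.Set String)
                = ["earn $", "high salary", "$3000 weekly"] from by decide,
              List.filter_filter, List.filter_filter]
          refine List.filter_congr fun x hx => ?_
          simp only [PySem.Set.contains_eq_listContains, bne, List.contains_cons, List.contains_nil,
            Bool.or_false, Bool.not_or]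
          ac_rfl
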